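-- pv_equiv track=rewrite | github.com/MobleyLab/waterNES | water_nes/analysis/nes_free_energy.py | find_unique_list_size
-- ===== SOURCE A (Python) =====
-- from typing import Any, Dict, List, Tuple, Union
--
-- def find_unique_list_size(dictionary: Dict[str, List[List[Any]]]) -> int:
--     r"""Return the size of the innermost list
--
--     :param dictionary: A dictionary containing list of lists
--     :return: The unique size of the inner lists, if it exists
--     """
--     size = None
--     for key in dictionary:
--         for inner_list in dictionary[key]:
--             if size is None:
--                 size = len(inner_list)
--             elif size != len(inner_list):
--                 raise RuntimeError("No common inner size list")
--     return size
-- ===== SOURCE B (Python) =====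
-- def find_unique_list_size(dictionary):
--     sizes = {len(inner) for key in dictionary for inner in dictionary[key]}
--     if not sizes:
--         return None
--     if len(sizes) > 1:
--         raise RuntimeError("No common inner size list")
--     return next(iter(sizes))
-- ===== Notes on version B (the rewrite author's own statement) =====
-- stated objective: simpler
-- what changed: Replaces the incremental first/else comparison loop (with its Optional state and short-circuit raise) by a one-shot set comprehension of all inner-list lengths, deciding from the set's cardinality.
import Mathlib
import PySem

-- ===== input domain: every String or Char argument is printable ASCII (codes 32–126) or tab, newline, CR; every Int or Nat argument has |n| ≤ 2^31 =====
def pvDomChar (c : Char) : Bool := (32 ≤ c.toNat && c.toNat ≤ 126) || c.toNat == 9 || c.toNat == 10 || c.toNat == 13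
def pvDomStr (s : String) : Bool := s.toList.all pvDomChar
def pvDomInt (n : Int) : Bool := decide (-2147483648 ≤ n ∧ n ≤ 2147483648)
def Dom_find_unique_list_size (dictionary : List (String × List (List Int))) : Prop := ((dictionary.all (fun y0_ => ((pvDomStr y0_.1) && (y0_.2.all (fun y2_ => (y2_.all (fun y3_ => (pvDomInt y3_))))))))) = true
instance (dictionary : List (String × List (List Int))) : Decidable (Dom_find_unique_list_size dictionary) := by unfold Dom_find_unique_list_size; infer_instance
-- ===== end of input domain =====

-- Header: B replaces A's incremental running-size comparison by a one-shot set of inner lengths decided by cardinality (objective: simpler).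
-- ===== PORT A =====
-- inner loop over dictionary[key]; outer `none` models the RuntimeError raise (excluded by Pre_)
def pvA_inner : Option Int → List (List Int) → Option (Option Int)
  | size, [] => some size
  | size, inner :: rest =>
    match size with
    | none => pvA_inner (some (PySem.List.len inner)) rest
    | some s => if s ≠ PySem.List.len inner then none else pvA_inner (some s) rest

-- outer loop over the dict's keys; dictionary[key] is the paired value since keys are unique
def pvA_outer : Option Int → List (String × List (List Int)) → Option (Option Int)
  | size, [] => some size
  | size, (_, v) :: rest =>
    match pvA_inner size v with
    | none => none
    | some size' => pvA_outer size' rest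

def find_unique_list_size (dictionary : List (String × List (List Int))) : Option Int :=
  match pvA_outer none (PySem.Dict.ofList dictionary).items with
  | some size => size
  | none => none  -- raise RuntimeError("No common inner size list"): excluded by Pre_

-- ===== PORT B =====
def find_unique_list_size_alt (dictionary : List (String × List (List Int))) : Option Int :=
  let d := PySem.Dict.ofList dictionary
  let sizes : PySem.Set Int :=
    PySem.Set.ofList ((d.items.flatMap (fun p => p.2)).map (fun inner => PySem.List.len inner))
  if sizes.length = 0 then none            -- if not sizes: return None
  else if 1 < sizes.length then none       -- raise RuntimeError("No common inner size list"): excluded by Pre_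
  else sizes[0]?                           -- next(iter(sizes)) of a singleton set

-- ===== PRECONDITION & SPEC =====
-- Pre_ excludes exactly the inputs on which A (and B) raise RuntimeError: two inner lists of different lengths.
def Pre_find_unique_list_size (dictionary : List (String × List (List Int))) : Prop :=
  ∀ l ∈ (PySem.Dict.ofList dictionary).items.flatMap (fun p => p.2),
    ∀ m ∈ (PySem.Dict.ofList dictionary).items.flatMap (fun p => p.2), l.length = m.length
instance (dictionary : List (String × List (List Int))) : Decidable (Pre_find_unique_list_size dictionary) := by
  unfold Pre_find_unique_list_size; infer_instance
def pvWitness_find_unique_list_size : (List (String × List (List Int))) := [("a", [[1], [2]]), ("b", [[3]])]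
def Spec_find_unique_list_size (dictionary : List (String × List (List Int))) (out : Option Int) : Prop := out = find_unique_list_size_alt dictionary
instance (dictionary : List (String × List (List Int))) (out : Option Int) : Decidable (Spec_find_unique_list_size dictionary out) := by unfold Spec_find_unique_list_size; infer_instance

-- ===== CLAIM (what is proved, stated in full; the proofs are below) =====
def Claim_equal_find_unique_list_size : Prop := ∀ (dictionary : List (String × List (List Int))), Dom_find_unique_list_size dictionary → Pre_find_unique_list_size dictionary → Spec_find_unique_list_size dictionary (find_unique_list_size dictionary)

-- ===== LEMMAS AND PROOFS =====

-- the inner loop with a known size, all lengths agreeing, keeps that size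
theorem pvA_inner_some (s : Int) (ls : List (List Int)) (h : ∀ l ∈ ls, PySem.List.len l = s) :
    pvA_inner (some s) ls = some (some s) := by
  induction ls with
  | nil => rfl
  | cons l rest ih =>
    have hl := h l (by simp)
    simp only [pvA_inner]
    rw [if_neg (fun hne => hne hl.symm)]
    exact ih (fun m hm => h m (by simp [hm]))

-- the outer loop with a known size, all lengths agreeing, keeps that size
theorem pvA_outer_some (s : Int) (d : List (String × List (List Int)))
    (h : ∀ l ∈ d.flatMap (fun p => p.2), PySem.List.len l = s) :
    pvA_outer (some s) d = some (some s) := by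
  induction d with
  | nil => rfl
  | cons p rest ih =>
    obtain ⟨k, v⟩ := p
    simp only [pvA_outer, pvA_inner_some s v (fun l hl => h l (by simp [hl]))]
    exact ih (fun l hl => h l (by simp [hl]))

-- A's full scan under Pre_: the length of the first inner list (or none)
theorem pvA_outer_none (d : List (String × List (List Int)))
    (h : ∀ l ∈ d.flatMap (fun p => p.2), ∀ m ∈ d.flatMap (fun p => p.2), l.length = m.length) :
    pvA_outer none d =
      some ((d.flatMap (fun p => p.2)).head?.map (fun l => PySem.List.len l)) := by
  induction d with
  | nil => rfl
  | cons p rest ih =>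
    obtain ⟨k, v⟩ := p
    cases v with
    | nil =>
      simpa [pvA_outer, pvA_inner] using ih (fun l hl m hm => h l (by simp [hl]) m (by simp [hm]))
    | cons l v' =>
      have hall : ∀ m ∈ v' ++ rest.flatMap (fun p => p.2), PySem.List.len m = PySem.List.len l := by
        intro m hm
        have hm' : m ∈ List.flatMap (fun p => p.2) ((k, l :: v') :: rest) := by
          simp at hm ⊢; tauto
        have := h m hm' l (by simp)
        simp [PySem.List.len_eq, this]
      have h1 : pvA_inner none (l :: v') = some (some (PySem.List.len l)) := by
        simp only [pvA_inner]
        exact pvA_inner_some _ v' (fun m hm => hall m (by simp [hm]))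
      have h2 := pvA_outer_some (PySem.List.len l) rest (fun m hm => hall m (by simp [hm]))
      simp only [pvA_outer, h1]
      rw [h2]
      simp

-- a list whose elements all equal c dedups to [] or [c]
theorem pvSet_ofList_const {xs : List Int} {c : Int} (h : ∀ x ∈ xs, x = c) :
    PySem.Set.ofList xs = if xs = [] then ([] : List Int) else [c] := by
  induction xs with
  | nil => rfl
  | cons x rest ih =>
    have hx : x = c := h x (by simp)
    rw [PySem.Set.ofList_cons, ih (fun y hy => h y (by simp [hy]))]
    rcases Decidable.em (rest = []) with hr | hr <;>
      simp [hr, hx, PySem.Set.discard, List.filter]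

-- B's cardinality test on the deduped lengths equals the head length, for any equal-length family
theorem pv_main_core (L : List (List Int))
    (h : ∀ l ∈ L, ∀ m ∈ L, l.length = m.length) :
    L.head?.map (fun l => PySem.List.len l) =
      (let sizes : PySem.Set Int :=
        PySem.Set.ofList (L.map (fun inner => PySem.List.len inner))
      if sizes.length = 0 then none
      else if 1 < sizes.length then none
      else sizes[0]?) := by
  cases L with
  | nil => rfl
  | cons l0 rest =>
    have hconst : ∀ x ∈ (l0 :: rest).map (fun inner => PySem.List.len inner),
        x = PySem.List.len l0 := by
      intro x hx
      obtain ⟨inner, hmem, rfl⟩ := List.mem_map.mp hx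
      simp only [PySem.List.len_eq, Int.natCast_inj]
      exact h inner hmem l0 (by simp)
    simp only [pvSet_ofList_const hconst]
    simp

-- ===== VERDICT (by name: the statement is the Claim_ definition above) =====
theorem find_unique_list_size_spec : Claim_equal_find_unique_list_size := by
  unfold Claim_equal_find_unique_list_size
  intro dictionary _ hpre
  unfold Pre_find_unique_list_size at hpre
  unfold Spec_find_unique_list_size find_unique_list_size find_unique_list_size_alt
  rw [pvA_outer_none _ hpre]
  exact pv_main_core _ hpre
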